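-- pv_equiv track=rewrite | github.com/alwunder/GeMS-tools-extensions | AdvancedUnitSorting/ReduceHierarchyKeys.py | reduce_hierarchy_keys
-- ===== SOURCE A (Python) =====
-- def reduce_hierarchy_keys(keys):
--     # Sort keys to ensure proper prefix matching
--     keys = sorted(keys)
--
--     # Step 1: Remove keys that are prefixes of other keys
--     reduced = []
--     for i, key in enumerate(keys):
--         is_prefix = False
--         for other_key in keys[i + 1:]:
--             if other_key.startswith(key + "-"):
--                 is_prefix = True
--                 break
--         if not is_prefix:
--             reduced.append(key)
--
--     # Step 2: Find common prefix among reduced keys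
--     def split_parts(k): return k.split("-")
--     split_keys = list(map(split_parts, reduced))
--
--     # Transpose to find shared prefix components
--     common_parts = []
--     for parts in zip(*split_keys):
--         if all(p == parts[0] for p in parts):
--             common_parts.append(parts[0])
--         else:
--             break
--
--     # Step 3: Strip common prefix
--     prefix_len = len(common_parts)
--     final = ["-".join(parts[prefix_len:]) for parts in split_keys]
--
--     return final, "-".join(common_parts) if common_parts else None
-- ===== SOURCE B (Python) =====
-- def _lcp(a, b):
--     out = []
--     for x, y in zip(a, b):
--         if x != y:
--             break
--         out.append(x)
--     return out
--
--
-- def reduce_hierarchy_keys(keys):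
--     # Phase 1: a key must be dropped iff some key extends it past a '-' boundary,
--     # i.e. iff it equals s[:i] for some key s with s[i] == '-'.  Collect every such
--     # cut prefix once into a hash set; no pairwise startswith scans are needed.
--     prefixes = set()
--     for s in keys:
--         for i, ch in enumerate(s):
--             if ch == "-":
--                 prefixes.add(s[:i])
--     survivors = [k for k in sorted(keys) if k not in prefixes]
--
--     # Phase 2: fold a component-wise longest-common-prefix over the survivors.
--     common = None
--     for k in survivors:
--         parts = k.split("-")
--         common = parts if common is None else _lcp(common, parts)
--     if common is None:
--         return [], None
--     n = len(common)
--     return (["-".join(k.split("-")[n:]) for k in survivors],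
--             "-".join(common) if common else None)
-- ===== Notes on version B (the rewrite author's own statement) =====
-- stated objective: faster
-- what changed: Phase 1's quadratic scan of all later keys for a startswith match is replaced by one hash set of every '-'-cut prefix s[:i] of every key (membership test instead of an inner scan), and phase 2's transpose-the-split-keys loop is replaced by folding a component-wise longest-common-prefix over the survivors.
import Mathlib
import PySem

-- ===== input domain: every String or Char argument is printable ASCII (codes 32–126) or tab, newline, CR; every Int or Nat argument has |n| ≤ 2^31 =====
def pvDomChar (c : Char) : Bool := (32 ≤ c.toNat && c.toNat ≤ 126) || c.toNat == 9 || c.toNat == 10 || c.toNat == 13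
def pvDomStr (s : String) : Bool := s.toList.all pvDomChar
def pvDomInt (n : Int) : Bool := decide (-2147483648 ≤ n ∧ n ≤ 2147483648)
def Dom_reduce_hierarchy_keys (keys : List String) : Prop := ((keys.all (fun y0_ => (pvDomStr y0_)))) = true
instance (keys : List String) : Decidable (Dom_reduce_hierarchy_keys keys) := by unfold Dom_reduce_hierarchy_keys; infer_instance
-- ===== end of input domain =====

-- B replaces A's quadratic later-key startswith scan by a set of '-'-cut prefixes and A's
-- column-transpose common-prefix loop by a fold of a component-wise LCP (objective: faster).


-- ===== PORT A =====
-- zip(*split_keys): PySem has only binary zip, so n-ary zip is hand-ported: it emits the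
-- column of row heads while every row is nonempty and stops at the shortest row; zip() of
-- no rows is empty — exactly CPython's zip(*L).
def pvZipStar (L : List (List (List Char))) : List (List (List Char)) :=
  if L = [] ∨ L.any (fun r => r.isEmpty) then []
  else (L.map (fun r => r.headI)) :: pvZipStar (L.map (fun r => r.tail))
termination_by L.headI.length
decreasing_by
  rename_i h
  simp only [not_or, List.any_eq_true, not_exists, not_and] at h
  obtain ⟨h1, h2⟩ := h
  match L, h1, h2 with
  | r :: rs, _, h2 =>
    have hr : r.isEmpty = false := by
      have := h2 r (List.mem_cons_self)
      simpa using this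
    simp only [List.headI_cons]
    cases r with
    | nil => simp at hr
    | cons a as => simp

-- the 'for parts in zip(*split_keys)' loop with its break; parts[0] is headI (every column
-- produced by pvZipStar is nonempty, so the default is never read).
def pvColLoop : List (List (List Char)) → List (List Char)
  | [] => []
  | c :: rest => if c.all (fun p => p = c.headI) then c.headI :: pvColLoop rest else []

def reduce_hierarchy_keys (keys : List String) : List String × Option String :=
  let ks := PySem.List.sorted keys (fun k => k)
  let reduced := (PySem.List.enumerate ks).foldl (fun acc ik =>
      if !((PySem.List.slice ks (some (ik.1 + 1)) none).any
            (fun o => PySem.Str.startswith o (ik.2 ++ "-"))) then acc ++ [ik.2] else acc) []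
  let split_keys := reduced.map (fun k => PySem.Chars.splitOn k.toList ['-'])
  let common_parts := pvColLoop (pvZipStar split_keys)
  let prefix_len := common_parts.length
  let final := split_keys.map (fun parts =>
      String.ofList (PySem.Chars.join ['-'] (PySem.List.slice parts (some (prefix_len : Int)) none)))
  (final, if common_parts.isEmpty then none
          else some (String.ofList (PySem.Chars.join ['-'] common_parts)))

-- ===== PORT B =====
-- Source B's _lcp: zip, break on the first unequal pair, collect the equal ones.
def pvLcpGo : List (List Char × List Char) → List (List Char)
  | [] => []
  | (x, y) :: r => if x ≠ y then [] else x :: pvLcpGo r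

def pvLcp (a b : List (List Char)) : List (List Char) := pvLcpGo (a.zip b)

-- the body of Source B's 'common = parts if common is None else _lcp(common, parts)' loop
def pvStep (c : Option (List (List Char))) (k : String) : Option (List (List Char)) :=
  some (match c with
        | none => PySem.Chars.splitOn k.toList ['-']
        | some c0 => pvLcp c0 (PySem.Chars.splitOn k.toList ['-']))

def reduce_hierarchy_keys_alt (keys : List String) : List String × Option String :=
  let prefixes := keys.foldl (fun st s =>
      (PySem.List.enumerate s.toList).foldl (fun st2 p =>
        if p.2 = '-' then st2.add (PySem.Str.slice s none (some p.1)) else st2) st)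
    (PySem.Set.ofList [])
  let survivors := (PySem.List.sorted keys (fun k => k)).filter (fun k => !(prefixes.contains k))
  let common := survivors.foldl pvStep (none : Option (List (List Char)))
  match common with
  | none => ([], none)
  | some c =>
    (survivors.map (fun k =>
        String.ofList (PySem.Chars.join ['-']
          (PySem.List.slice (PySem.Chars.splitOn k.toList ['-']) (some (c.length : Int)) none))),
     if c.isEmpty then none else some (String.ofList (PySem.Chars.join ['-'] c)))

-- ===== PRECONDITION & SPEC =====
def Spec_reduce_hierarchy_keys (keys : List String) (out : List String × Option String) : Prop := out = reduce_hierarchy_keys_alt keys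
instance (keys : List String) (out : List String × Option String) : Decidable (Spec_reduce_hierarchy_keys keys out) := by unfold Spec_reduce_hierarchy_keys; infer_instance

-- ===== CLAIM (what is proved, stated in full; the proofs are below) =====
def Claim_equal_reduce_hierarchy_keys : Prop := ∀ (keys : List String), Dom_reduce_hierarchy_keys keys → Spec_reduce_hierarchy_keys keys (reduce_hierarchy_keys keys)

-- ===== LEMMAS AND PROOFS =====

-- A's phase-1 loop, restated as structural recursion over the sorted list.
def pvRed : List String → List String
  | [] => []
  | k :: rest =>
      if rest.any (fun o => PySem.Str.startswith o (k ++ "-")) then pvRed rest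
      else k :: pvRed rest

theorem pvFoldA (g : List String) : ∀ (suf pre acc : List String), pre ++ suf = g →
    (PySem.List.enumerate suf (pre.length : Int)).foldl (fun acc ik =>
      if !((PySem.List.slice g (some (ik.1 + 1)) none).any
            (fun o => PySem.Str.startswith o (ik.2 ++ "-"))) then acc ++ [ik.2] else acc) acc
    = acc ++ pvRed suf := by
  intro suf
  induction suf with
  | nil => intro pre acc _; simp [PySem.List.enumerate, pvRed]
  | cons k rest ih =>
    intro pre acc hg
    rw [PySem.List.enumerate_cons]
    simp only [List.foldl_cons]
    have hcast : (pre.length : Int) + 1 = ((pre.length + 1 : Nat) : Int) := by omega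
    have hdrop : List.drop (pre.length + 1) g = rest := by
      rw [← hg]
      have : pre ++ k :: rest = (pre ++ [k]) ++ rest := by simp
      rw [this]
      have hlen : pre.length + 1 = (pre ++ [k]).length := by simp
      rw [hlen, List.drop_left]
    have hslice : PySem.List.slice g (some ((pre.length : Int) + 1)) none = rest := by
      rw [hcast, PySem.List.slice_from_natCast, hdrop]
    have hstart : (pre.length : Int) + 1 = (((pre ++ [k]).length : Nat) : Int) := by
      simp
    rw [hslice, hstart]
    by_cases hany : rest.any (fun o => PySem.Str.startswith o (k ++ "-")) = true
    · simp only [hany, Bool.not_true, Bool.false_eq_true, if_false]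
      rw [ih (pre ++ [k]) acc (by simpa using hg)]
      have hred : pvRed (k :: rest) = pvRed rest := by
        show (if rest.any (fun o => PySem.Str.startswith o (k ++ "-")) = true then pvRed rest
              else k :: pvRed rest) = pvRed rest
        rw [if_pos hany]
      rw [hred]
    · have hany' : rest.any (fun o => PySem.Str.startswith o (k ++ "-")) = false :=
        Bool.eq_false_iff.mpr hany
      simp only [hany', Bool.not_false, if_true]
      rw [ih (pre ++ [k]) (acc ++ [k]) (by simpa using hg)]
      have hred : pvRed (k :: rest) = k :: pvRed rest := by
        show (if rest.any (fun o => PySem.Str.startswith o (k ++ "-")) = true then pvRed rest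
              else k :: pvRed rest) = k :: pvRed rest
        rw [if_neg (by rw [hany']; simp)]
      rw [hred]
      simp

theorem pvStartswith_lt (o k : String)
    (h : PySem.Str.startswith o (k ++ "-") = true) : k < o := by
  rw [PySem.Str.startswith_eq, PySem.Chars.startswith_iff, String.toList_append] at h
  obtain ⟨r, hr⟩ := h
  rw [String.lt_iff_toList_lt, ← hr]
  have : k.toList ++ "-".toList ++ r = k.toList ++ ('-' :: r) := by simp
  rw [this]
  show List.Lex _ k.toList _
  induction k.toList with
  | nil => exact List.Lex.nil
  | cons c cs ihc => exact List.Lex.cons ihc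

theorem pvStartswith_self (k : String) :
    PySem.Str.startswith k (k ++ "-") = false := by
  by_contra h
  have h' : PySem.Str.startswith k (k ++ "-") = true := by
    cases hb : PySem.Str.startswith k (k ++ "-") with
    | false => exact absurd hb h
    | true => rfl
  rw [PySem.Str.startswith_eq, PySem.Chars.startswith_iff, String.toList_append] at h'
  have := h'.length_le
  simp at this

theorem pvRed_filter (g : List String) (hg : g.Pairwise (· ≤ ·)) :
    ∀ (l pre : List String), pre ++ l = g →
    pvRed l = l.filter (fun k => !(g.any (fun o => PySem.Str.startswith o (k ++ "-")))) := by
  intro l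
  induction l with
  | nil => intro pre _; rfl
  | cons k rest ih =>
    intro pre hg'
    have hpair : ∀ a ∈ pre, a ≤ k := by
      intro a ha
      have := (List.pairwise_append.mp (hg' ▸ hg)).2.2
      exact this a ha k (List.mem_cons_self)
    have hany : g.any (fun o => PySem.Str.startswith o (k ++ "-"))
        = rest.any (fun o => PySem.Str.startswith o (k ++ "-")) := by
      rw [← hg']
      simp only [List.any_append, List.any_cons, pvStartswith_self, Bool.false_or]
      have hpre : pre.any (fun o => PySem.Str.startswith o (k ++ "-")) = false := by
        rw [List.any_eq_false]
        intro o ho hP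
        exact absurd (hpair o ho) (not_le.mpr (pvStartswith_lt o k hP))
      rw [hpre, Bool.false_or]
    show (if rest.any (fun o => PySem.Str.startswith o (k ++ "-")) = true then pvRed rest
          else k :: pvRed rest) = _
    rw [List.filter_cons, hany]
    by_cases hb : rest.any (fun o => PySem.Str.startswith o (k ++ "-")) = true
    · simp only [hb, if_true, Bool.not_true, Bool.false_eq_true, if_false]
      exact ih (pre ++ [k]) (by simpa using hg')
    · have hb' := Bool.eq_false_iff.mpr hb
      simp only [hb', Bool.false_eq_true, if_false, Bool.not_false, if_true]
      rw [ih (pre ++ [k]) (by simpa using hg')]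

theorem pvMemFoldAdd (keys : List String) :
    ∀ (st : PySem.Set String) (x : String),
    x ∈ keys.foldl (fun st s =>
        (PySem.List.enumerate s.toList).foldl (fun st2 p =>
          if p.2 = '-' then st2.add (PySem.Str.slice s none (some p.1)) else st2) st) st ↔
    x ∈ st ∨ ∃ s ∈ keys, ∃ p ∈ PySem.List.enumerate s.toList,
      p.2 = '-' ∧ x = PySem.Str.slice s none (some p.1) := by
  have inner : ∀ (s : String) (l : List (Int × Char)) (st : PySem.Set String) (x : String),
      x ∈ l.foldl (fun st2 p =>
        if p.2 = '-' then st2.add (PySem.Str.slice s none (some p.1)) else st2) st ↔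
      x ∈ st ∨ ∃ p ∈ l, p.2 = '-' ∧ x = PySem.Str.slice s none (some p.1) := by
    intro s l
    induction l with
    | nil => intro st x; simp
    | cons p l ih =>
      intro st x
      simp only [List.foldl_cons]
      by_cases hp : p.2 = '-'
      · rw [if_pos hp, ih]
        rw [PySem.Set.mem_add]
        constructor
        · rintro (⟨h | h⟩ | h)
          · exact Or.inl h
          · exact Or.inr ⟨p, List.mem_cons_self, hp, h⟩
          · obtain ⟨q, hq, h1, h2⟩ := h
            exact Or.inr ⟨q, List.mem_cons_of_mem _ hq, h1, h2⟩
        · rintro (h | ⟨q, hq, h1, h2⟩)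
          · exact Or.inl (Or.inl h)
          · rcases List.mem_cons.mp hq with rfl | hq'
            · exact Or.inl (Or.inr h2)
            · exact Or.inr ⟨q, hq', h1, h2⟩
      · rw [if_neg hp, ih]
        constructor
        · rintro (h | ⟨q, hq, h1, h2⟩)
          · exact Or.inl h
          · exact Or.inr ⟨q, List.mem_cons_of_mem _ hq, h1, h2⟩
        · rintro (h | ⟨q, hq, h1, h2⟩)
          · exact Or.inl h
          · rcases List.mem_cons.mp hq with rfl | hq'
            · exact absurd h1 hp
            · exact Or.inr ⟨q, hq', h1, h2⟩
  induction keys with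
  | nil => intro st x; simp
  | cons s keys ih =>
    intro st x
    simp only [List.foldl_cons]
    rw [ih, inner]
    constructor
    · rintro (⟨h | h⟩ | ⟨q, hq, hrest⟩)
      · exact Or.inl h
      · exact Or.inr ⟨s, List.mem_cons_self, h⟩
      · exact Or.inr ⟨q, List.mem_cons_of_mem _ hq, hrest⟩
    · rintro (h | ⟨q, hq, hrest⟩)
      · exact Or.inl (Or.inl h)
      · rcases List.mem_cons.mp hq with rfl | hq'
        · exact Or.inl (Or.inr hrest)
        · exact Or.inr ⟨q, hq', hrest⟩

theorem pvStartswith_iff_cut (s x : String) :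
    PySem.Str.startswith s (x ++ "-") = true ↔
    ∃ p ∈ PySem.List.enumerate s.toList, p.2 = '-' ∧ x = PySem.Str.slice s none (some p.1) := by
  constructor
  · intro h
    rw [PySem.Str.startswith_eq, PySem.Chars.startswith_iff, String.toList_append] at h
    obtain ⟨r, hr⟩ := h
    have hr' : x.toList ++ '-' :: r = s.toList := by simpa using hr
    set j := x.toList.length with hj
    have hjlt : j < s.toList.length := by
      rw [← hr', hj]
      have hxx : x.toList.length = x.length := by simp
      simp only [List.length_append, List.length_cons]
      omega
    refine ⟨((j : Int), s.toList[j]), ?_, ?_, ?_⟩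
    · rw [PySem.List.mem_enumerate_iff]
      exact ⟨j, hjlt, by simp⟩
    · show s.toList[j] = '-'
      have : s.toList[j]? = some '-' := by
        rw [← hr']
        rw [List.getElem?_append_right (le_refl _)]
        simp
      simpa [List.getElem?_eq_getElem hjlt] using this
    · have : (PySem.Str.slice s none (some (j : Int))).toList = x.toList := by
        rw [PySem.Str.toList_slice, PySem.Chars.slice_eq_listSlice, PySem.List.slice_to_natCast]
        rw [← hr']
        rw [hj]
        exact List.take_left
      have h3 := congrArg String.ofList this
      rw [String.ofList_toList, String.ofList_toList] at h3
      exact h3.symm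
  · rintro ⟨p, hp, hdash, hx⟩
    rw [PySem.List.mem_enumerate_iff] at hp
    obtain ⟨j, hjlt, rfl⟩ := hp
    rw [PySem.Str.startswith_eq, PySem.Chars.startswith_iff, String.toList_append]
    have hxl : x.toList = s.toList.take j := by
      rw [hx, PySem.Str.toList_slice, PySem.Chars.slice_eq_listSlice]
      have : (0 : Int) + (j : Int) = ((j : Nat) : Int) := by omega
      rw [this, PySem.List.slice_to_natCast]
    have hdash' : s.toList[j] = '-' := hdash
    refine ⟨s.toList.drop (j + 1), ?_⟩
    rw [hxl]
    have : "-".toList = ['-'] := rfl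
    rw [this]
    rw [← hdash', List.append_assoc, List.singleton_append, List.getElem_cons_drop]
    exact List.take_append_drop j s.toList

theorem pvLcp_prefix (a : List (List Char)) : ∀ b, pvLcp a b <+: a := by
  induction a with
  | nil => intro b; simp [pvLcp, pvLcpGo]
  | cons x a ih =>
    intro b
    cases b with
    | nil => simp [pvLcp, pvLcpGo]
    | cons y b =>
      by_cases hxy : x = y
      · subst hxy
        have : pvLcp (x :: a) (x :: b) = x :: pvLcp a b := by simp [pvLcp, pvLcpGo]
        rw [this]
        exact List.cons_prefix_cons.mpr ⟨rfl, ih b⟩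
      · simp [pvLcp, pvLcpGo, hxy]

theorem pvFoldl_lcp_nil (t : List (List (List Char))) : t.foldl pvLcp [] = [] := by
  induction t with
  | nil => rfl
  | cons l t ih => simpa [pvLcp] using ih

theorem pvFoldl_lcp_cons (x : List Char) (t : List (List (List Char))) :
    (∀ l ∈ t, ∃ l', l = x :: l') → ∀ h',
    t.foldl pvLcp (x :: h') = x :: (t.map List.tail).foldl pvLcp h' := by
  induction t with
  | nil => intro _ h'; rfl
  | cons l t ih =>
    intro h h'
    obtain ⟨l', rfl⟩ := h l (List.mem_cons_self)
    have step : pvLcp (x :: h') (x :: l') = x :: pvLcp h' l' := by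
      simp [pvLcp, pvLcpGo]
    simp only [List.foldl_cons, step, List.map_cons, List.tail_cons]
    exact ih (fun m hm => h m (List.mem_cons_of_mem _ hm)) (pvLcp h' l')

theorem pvFoldl_lcp_dead (x : List Char) : ∀ (t : List (List (List Char))),
    (∃ l ∈ t, ∀ l', l ≠ x :: l') →
    ∀ a, (a = [] ∨ ∃ h', a = x :: h') → t.foldl pvLcp a = [] := by
  intro t
  induction t with
  | nil => rintro ⟨l, hl, _⟩; simp at hl
  | cons l t ih =>
    rintro ⟨m, hm, hbad⟩ a ha
    rcases List.mem_cons.mp hm with rfl | hmem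
    · -- the bad row is first: the accumulator dies now
      have hz : pvLcp a m = [] := by
        rcases ha with rfl | ⟨h', rfl⟩
        · rfl
        · cases m with
          | nil => simp [pvLcp, pvLcpGo]
          | cons y m' =>
            have hyx : ¬x = y := fun hxy => hbad m' (by rw [hxy])
            simp [pvLcp, pvLcpGo, hyx]
      simp only [List.foldl_cons, hz]
      exact pvFoldl_lcp_nil t
    · have ha' : pvLcp a l = [] ∨ ∃ h', pvLcp a l = x :: h' := by
        rcases ha with rfl | ⟨h', rfl⟩
        · left; rfl
        · rcases pvLcp_prefix (x :: h') l with ⟨r, hr⟩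
          cases hp : pvLcp (x :: h') l with
          | nil => exact Or.inl rfl
          | cons z zs =>
            rw [hp] at hr
            have hz : z = x := by
              have := congrArg (·.head?) hr
              simpa using this
            exact Or.inr ⟨zs, by rw [hz]⟩
      simp only [List.foldl_cons]
      exact ih ⟨m, hmem, hbad⟩ _ ha'

theorem pvZipStar_nil : pvZipStar [] = [] := by
  rw [pvZipStar]
  simp

theorem pvZipStar_nil_row (t : List (List (List Char))) :
    pvZipStar ([] :: t) = [] := by
  rw [pvZipStar]
  simp

theorem pvColLoop_zipStar (h : List (List Char)) : ∀ (t : List (List (List Char))),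
    pvColLoop (pvZipStar (h :: t)) = t.foldl pvLcp h := by
  induction h with
  | nil =>
    intro t
    rw [pvZipStar_nil_row, pvFoldl_lcp_nil]
    rfl
  | cons x h' ih =>
    intro t
    by_cases hemp : ∃ l ∈ t, l = []
    · obtain ⟨l, hl, rfl⟩ := hemp
      have hz : pvZipStar ((x :: h') :: t) = [] := by
        rw [pvZipStar]
        simp only [List.any_eq_true]
        rw [if_pos (Or.inr ⟨[], List.mem_cons_of_mem _ hl, rfl⟩)]
      rw [hz]
      rw [pvFoldl_lcp_dead x t ⟨[], hl, fun l' => by simp⟩ (x :: h') (Or.inr ⟨h', rfl⟩)]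
      rfl
    · push_neg at hemp
      have hcond : ¬((x :: h') :: t = [] ∨ ((x :: h') :: t).any (fun r => r.isEmpty)) := by
        simp only [not_or, List.any_eq_true]
        refine ⟨by simp, ?_⟩
        rintro ⟨r, hr, hre⟩
        rcases List.mem_cons.mp hr with rfl | hrt
        · simp at hre
        · exact hemp r hrt (List.isEmpty_iff.mp hre)
      have hunf : pvZipStar ((x :: h') :: t)
          = (x :: t.map (fun r => r.headI)) :: pvZipStar (h' :: t.map (fun r => r.tail)) := by
        rw [pvZipStar, if_neg hcond]
        simp
      rw [hunf]
      by_cases hall : ∀ l ∈ t, l.headI = x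
      · have hshape : ∀ l ∈ t, ∃ l', l = x :: l' := by
          intro l hl
          cases l with
          | nil => exact absurd rfl (hemp [] hl)
          | cons a as => exact ⟨as, by rw [← hall (a :: as) hl]; rfl⟩
        simp only [pvColLoop, List.headI_cons]
        split_ifs with hc
        · rw [ih (t.map (fun r => r.tail))]
          rw [pvFoldl_lcp_cons x t hshape h']
        · exfalso
          apply hc
          simp only [List.all_cons, List.all_eq_true, Bool.and_eq_true, decide_eq_true_eq]
          refine ⟨trivial, fun p hp => ?_⟩
          obtain ⟨l, hl, rfl⟩ := List.mem_map.mp hp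
          exact hall l hl
      · push_neg at hall
        obtain ⟨l, hl, hne⟩ := hall
        simp only [pvColLoop, List.headI_cons]
        split_ifs with hc
        · exfalso
          simp only [List.all_cons, List.all_eq_true, Bool.and_eq_true, decide_eq_true_eq] at hc
          exact hne (hc.2 l.headI (List.mem_map_of_mem hl))
        · exact (pvFoldl_lcp_dead x t ⟨l, hl, fun l' hll => hne (by rw [hll]; rfl)⟩ (x :: h') (Or.inr ⟨h', rfl⟩)).symm

theorem pvFoldB (l : List String) : ∀ (c0 : List (List Char)),
    l.foldl pvStep (some c0)
    = some ((l.map (fun k => PySem.Chars.splitOn k.toList ['-'])).foldl pvLcp c0) := by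
  induction l with
  | nil => intro c0; rfl
  | cons k l ih =>
    intro c0
    simp only [List.foldl_cons, List.map_cons]
    exact ih (pvLcp c0 (PySem.Chars.splitOn k.toList ['-']))

-- the two phase-1 predicates agree on every key
theorem pvPred_eq (keys : List String) (k : String) :
    (keys.foldl (fun st s =>
        (PySem.List.enumerate s.toList).foldl (fun st2 p =>
          if p.2 = '-' then st2.add (PySem.Str.slice s none (some p.1)) else st2) st)
      (PySem.Set.ofList [])).contains k
    = keys.any (fun o => PySem.Str.startswith o (k ++ "-")) := by
  have hmem : k ∈ keys.foldl (fun st s =>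
        (PySem.List.enumerate s.toList).foldl (fun st2 p =>
          if p.2 = '-' then st2.add (PySem.Str.slice s none (some p.1)) else st2) st)
      (PySem.Set.ofList []) ↔ ∃ s ∈ keys, PySem.Str.startswith s (k ++ "-") = true := by
    rw [pvMemFoldAdd]
    constructor
    · rintro (h | ⟨s, hsmem, hp⟩)
      · exact absurd h (by simp [PySem.Set.ofList, PySem.Set.empty])
      · exact ⟨s, hsmem, (pvStartswith_iff_cut s k).mpr hp⟩
    · rintro ⟨s, hsmem, h⟩
      exact Or.inr ⟨s, hsmem, (pvStartswith_iff_cut s k).mp h⟩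
  rw [Bool.eq_iff_iff, List.any_eq_true]
  constructor
  · intro hc
    exact hmem.mp (List.mem_of_elem_eq_true hc)
  · intro h
    exact List.elem_eq_true_of_mem (hmem.mpr h)

-- ===== VERDICT (by name: the statement is the Claim_ definition above) =====
theorem reduce_hierarchy_keys_spec : Claim_equal_reduce_hierarchy_keys := by
  intro keys _
  show reduce_hierarchy_keys keys = reduce_hierarchy_keys_alt keys
  simp only [reduce_hierarchy_keys, reduce_hierarchy_keys_alt]
  -- phase 1: both reduced lists are pvRed of the sorted keys
  have h0 : ((List.nil : List String).length : Int) = 0 := by simp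
  have hA := pvFoldA (PySem.List.sorted keys (fun k => k))
      (PySem.List.sorted keys (fun k => k)) [] [] rfl
  rw [h0] at hA
  rw [List.nil_append] at hA
  have hpair : (PySem.List.sorted keys (fun k => k)).Pairwise (· ≤ ·) := by
    have := PySem.List.sorted_pairwise keys (fun k => k)
    simpa using this
  have hfilt := pvRed_filter (PySem.List.sorted keys (fun k => k)) hpair
      (PySem.List.sorted keys (fun k => k)) [] rfl
  have hperm : ∀ k : String,
      (PySem.List.sorted keys (fun k => k)).any (fun o => PySem.Str.startswith o (k ++ "-"))
      = keys.any (fun o => PySem.Str.startswith o (k ++ "-")) := by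
    intro k
    exact (PySem.List.sorted_perm keys (fun k => k) false).any_eq
  have hsurv : pvRed (PySem.List.sorted keys (fun k => k))
      = (PySem.List.sorted keys (fun k => k)).filter (fun k =>
          !((keys.foldl (fun st s =>
              (PySem.List.enumerate s.toList).foldl (fun st2 p =>
                if p.2 = '-' then st2.add (PySem.Str.slice s none (some p.1)) else st2) st)
            (PySem.Set.ofList [])).contains k)) := by
    rw [hfilt]
    apply List.filter_congr
    intro k _
    rw [pvPred_eq keys k, hperm k]
  rw [hA, hsurv]
  -- phase 2
  cases hsv : (PySem.List.sorted keys (fun k => k)).filter (fun k =>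
      !((keys.foldl (fun st s =>
          (PySem.List.enumerate s.toList).foldl (fun st2 p =>
            if p.2 = '-' then st2.add (PySem.Str.slice s none (some p.1)) else st2) st)
        (PySem.Set.ofList [])).contains k)) with
  | nil =>
    simp only [List.map_nil, pvZipStar_nil, List.foldl_nil]
    rfl
  | cons h t =>
    simp only [List.map_cons, List.foldl_cons]
    rw [pvColLoop_zipStar (PySem.Chars.splitOn h.toList ['-'])
        (t.map (fun k => PySem.Chars.splitOn k.toList ['-']))]
    have hstep : pvStep none h = some (PySem.Chars.splitOn h.toList ['-']) := rfl
    rw [hstep, pvFoldB t (PySem.Chars.splitOn h.toList ['-'])]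
    simp only [List.map_map]
    rfl
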